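-- pv_equiv track=rewrite | github.com/vkmouse/simulate-enchanting | server/simulate_enchanting/parser/category_parser/general_parser.py | __removeSymbolAndDigit
-- ===== SOURCE A (Python) =====
-- def __removeSymbolAndDigit(text: str):
--     text = ''.join([i for i in text if not i.isdigit()])
--     text = text.replace('+', '')
--     text = text.replace('-', '')
--     text = text.replace('%', '')
--     text = text.replace('~', '')
--     text = text.replace(' ', '')
--     text = text.replace(',', '')
--     return text
-- ===== SOURCE B (Python) =====
-- def __removeSymbolAndDigit(text: str):
--     return ''.join(c for c in text if not c.isdigit() and c not in '+-%~ ,')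
-- ===== Notes on version B (the rewrite author's own statement) =====
-- stated objective: simpler
-- what changed: Replaces the digit-comprehension plus six sequential .replace() passes with one single-pass filter keeping characters that are neither digits nor one of the six forbidden symbols.
import Mathlib
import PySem

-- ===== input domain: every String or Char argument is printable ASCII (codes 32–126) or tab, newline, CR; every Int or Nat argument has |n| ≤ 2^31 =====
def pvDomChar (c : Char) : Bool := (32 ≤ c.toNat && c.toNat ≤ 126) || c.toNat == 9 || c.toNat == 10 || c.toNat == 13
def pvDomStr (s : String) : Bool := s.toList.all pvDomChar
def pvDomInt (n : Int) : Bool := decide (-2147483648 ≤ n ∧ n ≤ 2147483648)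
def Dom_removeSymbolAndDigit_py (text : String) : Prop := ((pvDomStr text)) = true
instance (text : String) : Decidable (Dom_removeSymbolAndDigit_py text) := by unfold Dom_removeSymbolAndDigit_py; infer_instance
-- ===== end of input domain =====

-- B replaces A's digit-comprehension plus six sequential .replace passes with one single-pass
-- character filter; objective: simpler (one scan instead of seven, same asymptotic cost).

-- ===== PORT A =====
def removeSymbolAndDigit_py (text : String) : String :=
  let text := String.ofList (text.toList.foldl
    (fun acc i => if PySem.Chars.isdigit i = false then acc ++ [i] else acc) [])
  let text := PySem.Str.replace text "+" ""
  let text := PySem.Str.replace text "-" ""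
  let text := PySem.Str.replace text "%" ""
  let text := PySem.Str.replace text "~" ""
  let text := PySem.Str.replace text " " ""
  let text := PySem.Str.replace text "," ""
  text

-- ===== PORT B =====
def removeSymbolAndDigit_py_alt (text : String) : String :=
  String.ofList (text.toList.filter
    (fun c => !PySem.Chars.isdigit c && !("+-%~ ,".toList.contains c)))

-- ===== PRECONDITION & SPEC =====
def Spec_removeSymbolAndDigit_py (text : String) (out : String) : Prop := out = removeSymbolAndDigit_py_alt text
instance (text : String) (out : String) : Decidable (Spec_removeSymbolAndDigit_py text out) := by unfold Spec_removeSymbolAndDigit_py; infer_instance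

-- ===== CLAIM (what is proved, stated in full; the proofs are below) =====
def Claim_equal_removeSymbolAndDigit_py : Prop := ∀ (text : String), Dom_removeSymbolAndDigit_py text → Spec_removeSymbolAndDigit_py text (removeSymbolAndDigit_py text)

-- ===== LEMMAS AND PROOFS =====

-- replacing every occurrence of a single character by '' equals filtering it out (the loop of Chars.replace)
theorem replace_go_single (c : Char) :
    ∀ (fuel : Nat) (l acc : List Char), l.length ≤ fuel →
      PySem.Chars.replace.go [c] [] fuel l acc = acc.reverse ++ l.filter (fun x => x != c) := by
  intro fuel
  induction fuel with
  | zero =>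
    intro l acc h
    have : l = [] := List.eq_nil_of_length_eq_zero (Nat.le_zero.mp h)
    subst this
    simp [PySem.Chars.replace.go]
  | succ n ih =>
    intro l acc h
    cases l with
    | nil => simp [PySem.Chars.replace.go]
    | cons c' t =>
      simp only [PySem.Chars.replace.go]
      by_cases hc : c = c'
      · subst hc
        have hpre : List.isPrefixOf [c] (c :: t) = true := by simp [List.isPrefixOf]
        rw [if_pos hpre]
        simp only [List.length_cons, List.drop_succ_cons, List.length_nil, List.drop_zero,
          List.reverse_nil, List.nil_append]
        rw [ih t acc (by simpa using Nat.le_of_succ_le_succ h)]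
        simp [List.filter]
      · have hpre : List.isPrefixOf [c] (c' :: t) = false := by
          simp [List.isPrefixOf]; exact fun hh => absurd hh hc
        rw [if_neg (by simp [hpre])]
        rw [ih t (c' :: acc) (by simpa using Nat.le_of_succ_le_succ h)]
        have hb : (c' == c) = false := by simp [Ne.symm hc]
        simp [List.filter, bne, hb]

theorem replace_single (c : Char) (l : List Char) :
    PySem.Chars.replace l [c] [] = l.filter (fun x => x != c) := by
  rw [PySem.Chars.replace]
  simp only [List.isEmpty_cons, Bool.false_eq_true, if_false]
  exact replace_go_single c l.length l [] (le_refl _)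

-- ===== VERDICT (by name: the statement is the Claim_ definition above) =====
theorem removeSymbolAndDigit_py_spec : Claim_equal_removeSymbolAndDigit_py := by
  intro text _
  unfold Spec_removeSymbolAndDigit_py removeSymbolAndDigit_py removeSymbolAndDigit_py_alt
  refine String.toList_inj.mp ?_
  simp only [PySem.Str.toList_replace, String.toList_ofList]
  rw [show "+".toList = ['+'] from by decide, show "-".toList = ['-'] from by decide,
      show "%".toList = ['%'] from by decide, show "~".toList = ['~'] from by decide,
      show " ".toList = [' '] from by decide, show ",".toList = [','] from by decide,
      show "".toList = ([] : List Char) from by decide]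
  simp only [replace_single, PySem.List.foldl_append_ite_eq_filter, List.nil_append,
    List.filter_filter]
  refine List.filter_congr ?_
  intro c _
  by_cases hd : PySem.Chars.isdigit c <;>
    simp [hd, show "+-%~ ,".toList = ['+','-','%','~',' ',','] from by decide, bne] <;> ac_rfl
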